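-- pv_equiv track=rewrite | github.com/ValadaresX/dlLogs | scripts/convert_logs.py | process_cols_improved
-- ===== SOURCE A (Python) =====
-- def process_cols_improved(cols):
--     """
--     Processa colunas de forma otimizada usando um único loop e detecção de padrões.
--     Reduz iterações e alocações de memória.
--     """
--     resultado = {
--         "class_talents": [],
--         "pvp_talents": [],
--         "artifact_traits": None,
--         "equipped_items": [],
--         "interesting_auras": [],
--         "pvp_stats": cols[-4:],
--     }
--
--     i = 0
--     tamanho = len(cols)
--
--     while i < tamanho:
--         coluna = cols[i]
--
--         # Pula colunas vazias
--         if not coluna: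
--             i += 1
--             continue
--
--         # Identifica o tipo de dado baseado no padrão de início/fim
--         if coluna.startswith("["):
--             # Equipped items: começa com [(
--             if len(coluna) > 1 and coluna[1] == "(":
--                 lista = resultado["equipped_items"]
--                 fim = ")]"
--             # Class talents: primeiro grupo com [
--             elif not resultado["class_talents"]:
--                 lista = resultado["class_talents"]
--                 fim = "]"
--             # Artifact traits: segundo grupo com [ sem (
--             elif resultado["artifact_traits"] is None and (
--                 len(coluna) < 2 or coluna[1] != "("
--             ):
--                 lista = []
--                 resultado["artifact_traits"] = lista
--                 fim = "]"
--             # Interesting auras: último grupo com [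
--             else:
--                 lista = resultado["interesting_auras"]
--                 fim = "]"
--
--             # Coleta tokens até encontrar o fim do grupo
--             while not coluna.endswith(fim):
--                 lista.append(coluna)
--                 i += 1
--                 coluna = cols[i]
--             lista.append(coluna)
--
--         # PvP talents: começa com (
--         elif coluna.startswith("("):
--             lista = resultado["pvp_talents"]
--             while not coluna.endswith(")"):
--                 lista.append(coluna)
--                 i += 1
--                 coluna = cols[i]
--             lista.append(coluna)
--
--         i += 1
--
--     return resultado
-- ===== SOURCE B (Python) =====
-- def process_cols_improved(cols):
--     """Two-phase rewrite: tokenize once into (kind, tokens) groups, then assign groups by state."""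
--     # Phase 1: scan once, collecting groups in order.
--     groups = []
--     i, n = 0, len(cols)
--     while i < n:
--         c = cols[i]
--         if c.startswith("[("):
--             kind, end = "eq", ")]"
--         elif c.startswith("["):
--             kind, end = "br", "]"
--         elif c.startswith("("):
--             kind, end = "par", ")"
--         else:
--             i += 1
--             continue
--         toks = []
--         while not cols[i].endswith(end):  # IndexError on an unterminated group, as in A
--             toks.append(cols[i])
--             i += 1
--         toks.append(cols[i])
--         i += 1
--         groups.append((kind, toks))
--
--     # Phase 2: assign groups in order by state.
--     class_talents, pvp_talents, artifact, equipped, auras = [], [], None, [], []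
--     plain = 0
--     for kind, toks in groups:
--         if kind == "eq":
--             equipped.extend(toks)
--         elif kind == "par":
--             pvp_talents.extend(toks)
--         elif plain == 0:
--             class_talents = toks
--             plain = 1
--         elif plain == 1:
--             artifact = toks
--             plain = 2
--         else:
--             auras.extend(toks)
--
--     return {
--         "class_talents": class_talents,
--         "pvp_talents": pvp_talents,
--         "artifact_traits": artifact,
--         "equipped_items": equipped,
--         "interesting_auras": auras,
--         "pvp_stats": cols[-4:],
--     }
-- ===== Notes on version B (the rewrite author's own statement) =====
-- stated objective: alternative
-- what changed: Single stateful while-loop with inline classification and aliased result lists is replaced by two phases: a tokenizer producing an ordered list of (kind, tokens) groups, then a stateful fold assigning whole groups to categories.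
import Mathlib
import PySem

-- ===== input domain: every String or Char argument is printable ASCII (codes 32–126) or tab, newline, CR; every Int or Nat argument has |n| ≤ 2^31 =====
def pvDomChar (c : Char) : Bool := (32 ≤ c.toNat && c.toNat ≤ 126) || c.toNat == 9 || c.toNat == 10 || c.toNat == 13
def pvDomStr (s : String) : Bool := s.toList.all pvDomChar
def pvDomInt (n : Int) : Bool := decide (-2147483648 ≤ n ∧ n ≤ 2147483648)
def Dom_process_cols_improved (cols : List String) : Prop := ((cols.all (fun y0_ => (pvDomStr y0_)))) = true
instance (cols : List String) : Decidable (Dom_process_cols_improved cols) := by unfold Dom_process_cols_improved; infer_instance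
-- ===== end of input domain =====

-- B replaces A's single classifying loop by a tokenize-into-groups phase plus a stateful
-- assignment fold (objective: alternative decomposition, same cost). Equivalence of the
-- RETURN value is proved on Pre_ (inputs where A's group scan does not run off the end).

-- ===== PORT A =====
-- inner 'while not coluna.endswith(fim): lista.append(coluna); i += 1; coluna = cols[i]' + final append;
-- returns (lista, remaining cols after the terminating token). cols[i] out of range = A's IndexError,
-- reached only outside Pre_; the port then returns the tokens seen so far.
def pvCollectA (fim : String) (lista : List String) : List String → List String × List String
  | [] => (lista, [])
  | c :: rest =>
    if PySem.Str.endswith c fim then (lista ++ [c], rest)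
    else pvCollectA fim (lista ++ [c]) rest

theorem pvCollectA_snd_le (fim : String) : ∀ (l acc : List String),
    (pvCollectA fim acc l).2.length ≤ l.length := by
  intro l
  induction l with
  | nil => intro acc; simp [pvCollectA]
  | cons c rest ih =>
    intro acc
    by_cases h : PySem.Chars.endswith c.toList fim.toList = true <;> simp [pvCollectA, h]
    exact Nat.le_succ_of_le (ih _)

theorem pvCollectA_snd_cons_le (fim : String) (acc : List String) (c : String)
    (rest : List String) : (pvCollectA fim acc (c :: rest)).2.length ≤ rest.length := by
  by_cases h : PySem.Chars.endswith c.toList fim.toList = true <;> simp [pvCollectA, h]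
  exact pvCollectA_snd_le fim rest _

-- the loop state of A: (class_talents, pvp_talents, artifact_traits, equipped_items, interesting_auras)
def pvLoopA : List String → List String → Option (List String) → List String → List String →
    List String → List String × List String × Option (List String) × List String × List String
  | ct, pt, at?, eq, au, [] => (ct, pt, at?, eq, au)
  | ct, pt, at?, eq, au, c :: rest =>
    if c = "" then pvLoopA ct pt at? eq au rest
    else if PySem.Str.startswith c "[" then
      -- 'len(coluna) > 1 and coluna[1] == "("' is exactly pyGet? c 1 = some '('
      if PySem.Str.pyGet? c 1 = some '(' then
        let r := pvCollectA ")]" eq (c :: rest)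
        pvLoopA ct pt at? r.1 au r.2
      else if ct = [] then
        let r := pvCollectA "]" ct (c :: rest)
        pvLoopA r.1 pt at? eq au r.2
      else if at? = none ∧ (PySem.Str.len c < 2 ∨ PySem.Str.pyGet? c 1 ≠ some '(') then
        let r := pvCollectA "]" [] (c :: rest)
        pvLoopA ct pt (some r.1) eq au r.2
      else
        let r := pvCollectA "]" au (c :: rest)
        pvLoopA ct pt at? eq r.1 r.2
    else if PySem.Str.startswith c "(" then
      let r := pvCollectA ")" pt (c :: rest)
      pvLoopA ct r.1 at? eq au r.2
    else pvLoopA ct pt at? eq au rest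
termination_by _ _ _ _ _ l => l.length
decreasing_by
  all_goals simp
  all_goals exact pvCollectA_snd_cons_le _ _ _ _

def process_cols_improved (cols : List String) : List (String × Option (List String)) :=
  let s := pvLoopA [] [] none [] [] cols
  [("class_talents", some s.1), ("pvp_talents", some s.2.1), ("artifact_traits", s.2.2.1),
   ("equipped_items", some s.2.2.2.1), ("interesting_auras", some s.2.2.2.2),
   ("pvp_stats", some (PySem.List.slice cols (some (-4)) none))]

-- ===== PORT B =====
-- phase-1 inner loop: tokens of one group (fresh list) plus the remaining columns
def pvCollectB (fim : String) : List String → List String × List String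
  | [] => ([], [])
  | c :: rest =>
    if PySem.Str.endswith c fim then ([c], rest)
    else
      let r := pvCollectB fim rest
      (c :: r.1, r.2)

theorem pvCollectB_snd_le (fim : String) : ∀ (l : List String),
    (pvCollectB fim l).2.length ≤ l.length := by
  intro l
  induction l with
  | nil => simp [pvCollectB]
  | cons c rest ih =>
    by_cases h : PySem.Chars.endswith c.toList fim.toList = true <;> simp [pvCollectB, h]
    exact Nat.le_succ_of_le ih

theorem pvCollectB_snd_cons_le (fim : String) (c : String) (rest : List String) :
    (pvCollectB fim (c :: rest)).2.length ≤ rest.length := by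
  by_cases h : PySem.Chars.endswith c.toList fim.toList = true <;> simp [pvCollectB, h]
  exact pvCollectB_snd_le fim rest

-- phase 1: the ordered list of (kind, tokens) groups
def pvScanB : List String → List (String × List String)
  | [] => []
  | c :: rest =>
    if PySem.Str.startswith c "[(" then
      let r := pvCollectB ")]" (c :: rest)
      ("eq", r.1) :: pvScanB r.2
    else if PySem.Str.startswith c "[" then
      let r := pvCollectB "]" (c :: rest)
      ("br", r.1) :: pvScanB r.2
    else if PySem.Str.startswith c "(" then
      let r := pvCollectB ")" (c :: rest)
      ("par", r.1) :: pvScanB r.2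
    else pvScanB rest
termination_by l => l.length
decreasing_by
  all_goals simp
  all_goals exact pvCollectB_snd_cons_le _ _ _

-- phase 2: one step of the assignment fold; state = (class, pvp, artifact, equipped, auras, plain-count)
def pvStepB (s : List String × List String × Option (List String) × List String × List String × Nat)
    (g : String × List String) :
    List String × List String × Option (List String) × List String × List String × Nat :=
  match s with
  | (ct, pt, at?, eq, au, plain) =>
    if g.1 = "eq" then (ct, pt, at?, eq ++ g.2, au, plain)
    else if g.1 = "par" then (ct, pt ++ g.2, at?, eq, au, plain)
    else if plain = 0 then (g.2, pt, at?, eq, au, 1)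
    else if plain = 1 then (ct, pt, some g.2, eq, au, 2)
    else (ct, pt, at?, eq, au ++ g.2, plain)

def process_cols_improved_alt (cols : List String) : List (String × Option (List String)) :=
  let t := (pvScanB cols).foldl pvStepB ([], [], none, [], [], 0)
  [("class_talents", some t.1), ("pvp_talents", some t.2.1), ("artifact_traits", t.2.2.1),
   ("equipped_items", some t.2.2.2.1), ("interesting_auras", some t.2.2.2.2.1),
   ("pvp_stats", some (PySem.List.slice cols (some (-4)) none))]

-- ===== PRECONDITION & SPEC =====
-- Closed-form balanced-group condition on the columns, as a one-pass state machine (the state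
-- is the end marker of the currently open group, if any): a token '[(…' opens a group closed by
-- a token '…)]', '[…' by '…]', '(…' by '…)'; tokens outside a group that open nothing are free.
def pvBalanced : Option String → List String → Bool
  | some _, [] => false
  | none, [] => true
  | some fim, c :: rest =>
    if PySem.Str.endswith c fim then pvBalanced none rest else pvBalanced (some fim) rest
  | none, c :: rest =>
    if PySem.Str.startswith c "[(" then
      if PySem.Str.endswith c ")]" then pvBalanced none rest else pvBalanced (some ")]") rest
    else if PySem.Str.startswith c "[" then
      if PySem.Str.endswith c "]" then pvBalanced none rest else pvBalanced (some "]") rest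
    else if PySem.Str.startswith c "(" then
      if PySem.Str.endswith c ")" then pvBalanced none rest else pvBalanced (some ")") rest
    else pvBalanced none rest

-- Pre_ excludes exactly the inputs with an unterminated group, on which the Python A raises IndexError.
def Pre_process_cols_improved (cols : List String) : Prop := pvBalanced none cols = true
instance (cols : List String) : Decidable (Pre_process_cols_improved cols) := by
  unfold Pre_process_cols_improved; infer_instance

def pvWitness_process_cols_improved : List String :=
  ["[t1", "t2]", "", "(p1)", "[(i1)]", "[a1]", "s1", "s2", "s3", "s4"]

def Spec_process_cols_improved (cols : List String) (out : List (String × Option (List String))) : Prop := out = process_cols_improved_alt cols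
instance (cols : List String) (out : List (String × Option (List String))) : Decidable (Spec_process_cols_improved cols out) := by unfold Spec_process_cols_improved; infer_instance

-- ===== CLAIM (what is proved, stated in full; the proofs are below) =====
def Claim_equal_process_cols_improved : Prop := ∀ (cols : List String), Dom_process_cols_improved cols → Pre_process_cols_improved cols → Spec_process_cols_improved cols (process_cols_improved cols)

-- ===== LEMMAS AND PROOFS =====

theorem pv_collect_eq (fim : String) : ∀ (l acc : List String),
    pvCollectA fim acc l = (acc ++ (pvCollectB fim l).1, (pvCollectB fim l).2) := by
  intro l
  induction l with
  | nil => intro acc; simp [pvCollectA, pvCollectB]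
  | cons c rest ih =>
    intro acc
    by_cases h : PySem.Chars.endswith c.toList fim.toList = true <;>
      simp [pvCollectA, pvCollectB, h, ih]

theorem pvCollectB_fst_ne_nil (fim c : String) (rest : List String) :
    (pvCollectB fim (c :: rest)).1 ≠ [] := by
  by_cases h : PySem.Chars.endswith c.toList fim.toList = true <;> simp [pvCollectB, h]

-- the plain-group counter of B, read off A's state
def pvBk (ct : List String) (at? : Option (List String)) : Nat :=
  match at? with
  | some _ => 2
  | none => if ct = [] then 0 else 1

def pvStrip (t : List String × List String × Option (List String) × List String × List String × Nat) :
    List String × List String × Option (List String) × List String × List String :=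
  (t.1, t.2.1, t.2.2.1, t.2.2.2.1, t.2.2.2.2.1)

-- '[(' prefix = '[' prefix plus '(' at index 1 (A's equipped test vs B's startswith test)
theorem pv_sw_aux (l : List Char) :
    PySem.Chars.startswith l ['[', '('] =
      (PySem.Chars.startswith l ['['] && (PySem.List.pyGet? l 1 == some '(')) := by
  match l with
  | [] => rfl
  | [a] =>
    simp [PySem.Chars.startswith, List.isPrefixOf, PySem.List.pyGet?, PySem.List.pyIdx?]
  | a :: b :: t =>
    by_cases ha : a = '[' <;> by_cases hb : b = '(' <;>
      simp [PySem.Chars.startswith, List.isPrefixOf, PySem.List.pyGet?, PySem.List.pyIdx?,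
        ha, hb, eq_comm]
    have h1 : ('[' == a) = false := by simp [Ne.symm ha]
    rw [h1, Bool.false_and, Bool.false_and]

theorem pv_sw_bracketParen (c : String) :
    PySem.Str.startswith c "[(" =
      (PySem.Str.startswith c "[" && (PySem.Str.pyGet? c 1 == some '(')) := by
  have h := pv_sw_aux c.toList
  simpa using h

-- main loop correspondence: A's loop from any reachable state equals B's fold over the groups
theorem pv_loop_eq : ∀ (n : Nat) (l : List String) (ct pt eq au : List String)
    (at? : Option (List String)), l.length ≤ n → (at? = none ∨ ct ≠ []) →
    pvLoopA ct pt at? eq au l =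
      pvStrip ((pvScanB l).foldl pvStepB (ct, pt, at?, eq, au, pvBk ct at?)) := by
  intro n
  induction n with
  | zero =>
    intro l ct pt eq au at? hlen _
    have : l = [] := List.eq_nil_of_length_eq_zero (Nat.le_zero.mp hlen)
    subst this
    simp [pvLoopA, pvScanB, pvStrip]
  | succ n ih =>
    intro l ct pt eq au at? hlen hinv
    match l with
    | [] => simp [pvLoopA, pvScanB, pvStrip]
    | c :: rest =>
      have hrest : rest.length ≤ n := by simpa using hlen
      by_cases hbr : PySem.Str.startswith c "[" = true
      · have hempty : ¬ c = "" := by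
          rintro rfl
          exact absurd hbr (by decide)
        by_cases hpar : PySem.Str.pyGet? c 1 = some '('
        · -- equipped_items group
          have hsw : PySem.Str.startswith c "[(" = true := by
            rw [pv_sw_bracketParen, hbr, hpar]; rfl
          simp only [pvLoopA, pvScanB]
          rw [if_neg hempty, if_pos hbr, if_pos hpar, if_pos hsw]
          rw [pv_collect_eq]
          rw [ih _ ct pt _ au at? (le_trans (pvCollectB_snd_cons_le ")]" c rest) hrest) hinv]
          simp [pvStepB, pvBk]
        · -- plain-[ group
          have hq : (PySem.Str.pyGet? c 1 == some '(') = false := by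
            simpa using hpar
          have hsw : PySem.Str.startswith c "[(" = false := by
            rw [pv_sw_bracketParen, hq, Bool.and_false]
          have hlt2 : (pvCollectB "]" (c :: rest)).2.length ≤ n :=
            le_trans (pvCollectB_snd_cons_le "]" c rest) hrest
          by_cases hct : ct = []
          · -- class_talents
            have hat : at? = none := by
              rcases hinv with h | h
              · exact h
              · exact absurd hct h
            subst hat; subst hct
            simp only [pvLoopA, pvScanB]
            rw [if_neg hempty, if_pos hbr, if_neg hpar]
            rw [if_pos trivial,
              if_neg (by rw [hsw]; exact Bool.false_ne_true), if_pos hbr]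
            rw [pv_collect_eq]
            rw [ih _ _ pt eq au none hlt2
              (Or.inr (by simpa using pvCollectB_fst_ne_nil "]" c rest))]
            simp [pvStepB, pvBk, pvCollectB_fst_ne_nil "]" c rest]
          · match at? with
            | none =>
              -- artifact_traits
              simp only [pvLoopA, pvScanB]
              rw [if_neg hempty, if_pos hbr, if_neg hpar, if_neg hct,
                if_pos ⟨trivial, Or.inr hpar⟩,
                if_neg (by rw [hsw]; exact Bool.false_ne_true), if_pos hbr]
              rw [pv_collect_eq]
              rw [ih _ ct pt eq au (some _) hlt2 (Or.inr hct)]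
              simp [pvStepB, pvBk, hct]
            | some av =>
              -- interesting_auras
              simp only [pvLoopA, pvScanB]
              rw [if_neg hempty, if_pos hbr, if_neg hpar, if_neg hct,
                if_neg (by rintro ⟨h, -⟩; exact Option.some_ne_none av h),
                if_neg (by rw [hsw]; exact Bool.false_ne_true), if_pos hbr]
              rw [pv_collect_eq]
              rw [ih _ ct pt eq _ (some av) hlt2 (Or.inr hct)]
              simp [pvStepB, pvBk]
      · -- not a '[' group
        have hsw : PySem.Str.startswith c "[(" = false := by
          rw [pv_sw_bracketParen, Bool.eq_false_iff.mpr hbr, Bool.false_and]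
        by_cases hpa : PySem.Str.startswith c "(" = true
        · -- pvp_talents group
          have hempty : ¬ c = "" := by
            rintro rfl
            exact absurd hpa (by decide)
          simp only [pvLoopA, pvScanB]
          rw [if_neg hempty, if_neg hbr, if_pos hpa,
            if_neg (by rw [hsw]; exact Bool.false_ne_true), if_neg hbr, if_pos hpa]
          rw [pv_collect_eq]
          rw [ih _ ct _ eq au at? (le_trans (pvCollectB_snd_cons_le ")" c rest) hrest) hinv]
          simp [pvStepB, pvBk]
        · -- skipped column (empty or any other token)
          have hscan : pvScanB (c :: rest) = pvScanB rest := by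
            simp only [pvScanB]
            rw [if_neg (by rw [hsw]; exact Bool.false_ne_true), if_neg hbr, if_neg hpa]
          by_cases hempty : c = ""
          · subst hempty
            simp only [pvLoopA]
            rw [if_pos trivial, hscan]
            exact ih rest ct pt eq au at? hrest hinv
          · simp only [pvLoopA]
            rw [if_neg hempty, if_neg hbr, if_neg hpa, hscan]
            exact ih rest ct pt eq au at? hrest hinv

-- ===== VERDICT (by name: the statement is the Claim_ definition above) =====
theorem process_cols_improved_spec : Claim_equal_process_cols_improved := by
  intro cols _ _
  unfold Spec_process_cols_improved process_cols_improved process_cols_improved_alt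
  rw [pv_loop_eq cols.length cols [] [] [] [] none (le_refl _) (Or.inl rfl)]
  have hbk : pvBk [] none = 0 := rfl
  rw [hbk]
  obtain ⟨a, b, cc, d, e, f⟩ := (pvScanB cols).foldl pvStepB ([], [], none, [], [], 0)
  simp [pvStrip]
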